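-- pv_equiv track=rewrite | github.com/tmarketin/Advent-of-Code-2017 | day25.py | part1
-- ===== SOURCE A (Python) =====
-- from collections import defaultdict
--
-- ops = {'A': (lambda curr: (1, 1, 'B') if(curr == 0) else (0, -1, 'C')),
--        'B': (lambda curr: (1, -1, 'A') if(curr == 0) else (1, 1, 'C')),
--        'C': (lambda curr: (1, 1, 'A') if(curr == 0) else (0, -1, 'D')),
--        'D': (lambda curr: (1, -1, 'E') if(curr == 0) else (1, -1, 'C')),
--        'E': (lambda curr: (1, 1, 'F') if(curr == 0) else (1, 1, 'A')),
--        'F': (lambda curr: (1, 1, 'A') if(curr == 0) else (1, 1, 'E'))}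
--
-- def part1(maxstep, state):
--     tm = defaultdict(int)
--     curr = 0
--     for step in range(maxstep):
--         wr, nextpos, nextstate = ops[state] (tm[curr])
--         tm[curr] = wr
--         curr = curr + nextpos
--         state = nextstate
--
--     s = 0
--     for key, value in tm.items():
--         s = s + value
--     return s
-- ===== SOURCE B (Python) =====
-- # B: tape as a two-stack zipper (left stack, head cell, right stack); moving the head
-- # pushes/pops the stacks, so no tape positions or hashing exist at all; checksum is
-- # sum(left) + head + sum(right).
-- TABLE = {'A': ((1, 1, 'B'), (0, -1, 'C')),
--          'B': ((1, -1, 'A'), (1, 1, 'C')),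
--          'C': ((1, 1, 'A'), (0, -1, 'D')),
--          'D': ((1, -1, 'E'), (1, -1, 'C')),
--          'E': ((1, 1, 'F'), (1, 1, 'A')),
--          'F': ((1, 1, 'A'), (1, 1, 'E'))}
--
-- def part1(maxstep, state):
--     left, head, right = [], 0, []
--     for _ in range(maxstep):
--         wr, mv, state = TABLE[state][head]
--         if mv == 1:
--             left.append(wr)
--             head = right.pop() if right else 0
--         else:
--             right.append(wr)
--             head = left.pop() if left else 0
--     return sum(left) + head + sum(right)
-- ===== Notes on version B (the rewrite author's own statement) =====
-- stated objective: alternative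
-- what changed: B represents the tape as a two-stack zipper (left stack, head cell, right stack): a move pushes the written bit on one stack and pops the neighbour cell off the other, so no tape positions, dict or hashing are maintained, and the checksum is sum(left)+head+sum(right) instead of summing a defaultdict of touched cells.
import Mathlib
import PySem

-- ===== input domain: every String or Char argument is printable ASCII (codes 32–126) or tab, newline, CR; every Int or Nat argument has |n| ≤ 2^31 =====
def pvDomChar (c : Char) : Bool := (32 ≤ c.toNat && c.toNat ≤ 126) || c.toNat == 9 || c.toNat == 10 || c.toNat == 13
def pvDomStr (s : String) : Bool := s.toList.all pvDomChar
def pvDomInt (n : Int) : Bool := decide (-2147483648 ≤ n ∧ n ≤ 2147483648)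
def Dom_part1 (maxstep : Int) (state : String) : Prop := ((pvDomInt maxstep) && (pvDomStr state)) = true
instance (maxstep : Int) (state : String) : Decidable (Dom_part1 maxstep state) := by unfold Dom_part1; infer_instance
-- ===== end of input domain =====

-- B replaces A's position-indexed defaultdict tape with a two-stack zipper (left stack,
-- head cell, right stack); moves push/pop the stacks and the checksum is
-- sum(left)+head+sum(right) (alternative data structure, no speed claim).

-- ===== PORT A =====
-- the `ops` table: lambda for state `st` applied to current cell value; none = KeyError on an unknown state
def opsA (st : String) (curr : Int) : Option (Int × Int × String) :=
  if st = "A" then some (if curr = 0 then ((1:Int), (1:Int), "B") else (0, -1, "C"))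
  else if st = "B" then some (if curr = 0 then (1, -1, "A") else (1, 1, "C"))
  else if st = "C" then some (if curr = 0 then (1, 1, "A") else (0, -1, "D"))
  else if st = "D" then some (if curr = 0 then (1, -1, "E") else (1, -1, "C"))
  else if st = "E" then some (if curr = 0 then (1, 1, "F") else (1, 1, "A"))
  else if st = "F" then some (if curr = 0 then (1, 1, "A") else (1, 1, "E"))
  else none

-- one loop iteration of A: read tm[curr] (default 0), write, move, change state; none once raised
def stepA (acc : Option (PySem.Dict Int Int × Int × String)) :
    Option (PySem.Dict Int Int × Int × String) :=
  match acc with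
  | none => none
  | some (tm, curr, st) =>
    match opsA st (tm.getD curr 0) with
    | none => none
    | some (wr, nextpos, nextstate) => some (tm.insert curr wr, curr + nextpos, nextstate)

def part1 (maxstep : Int) (state : String) : Int :=
  match (PySem.List.pyRange 0 maxstep 1).foldl (fun acc _ => stepA acc)
      (some ((PySem.Dict.empty : PySem.Dict Int Int), (0 : Int), state)) with
  | none => 0
  | some (tm, _, _) => tm.items.foldl (fun s p => s + p.2) 0

-- ===== PORT B =====
-- the TABLE dict of Source B: state -> (row for bit 0, row for bit 1); none = KeyError
def tableB (st : String) : Option ((Int × Int × String) × (Int × Int × String)) :=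
  if st = "A" then some ((1, 1, "B"), (0, -1, "C"))
  else if st = "B" then some ((1, -1, "A"), (1, 1, "C"))
  else if st = "C" then some ((1, 1, "A"), (0, -1, "D"))
  else if st = "D" then some ((1, -1, "E"), (1, -1, "C"))
  else if st = "E" then some ((1, 1, "F"), (1, 1, "A"))
  else if st = "F" then some ((1, 1, "A"), (1, 1, "E"))
  else none

-- tuple indexing TABLE[state][head] by the head bit (head is always 0 or 1 at run time)
def pickB (t : (Int × Int × String) × (Int × Int × String)) (i : Int) :
    Option (Int × Int × String) :=
  if i = 0 then some t.1 else if i = 1 then some t.2 else none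

-- `xs.pop() if xs else 0`: pop the stack top (list end), an absent neighbour cell reads 0
def popTop (xs : List Int) : Int × List Int :=
  match xs.getLast? with
  | none => (0, xs)
  | some v => (v, xs.dropLast)

-- one loop iteration of B on the zipper (left, head, right, state)
def stepB (acc : Option (List Int × Int × List Int × String)) :
    Option (List Int × Int × List Int × String) :=
  match acc with
  | none => none
  | some (left, head, right, st) =>
    match tableB st with
    | none => none
    | some t =>
      match pickB t head with
      | none => none
      | some (wr, mv, ns) =>
        if mv = 1 then
          let p := popTop right
          some (left ++ [wr], p.1, p.2, ns)
        else
          let p := popTop left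
          some (p.2, p.1, right ++ [wr], ns)

def part1_alt (maxstep : Int) (state : String) : Int :=
  match (PySem.List.pyRange 0 maxstep 1).foldl (fun acc _ => stepB acc)
      (some (([] : List Int), (0 : Int), ([] : List Int), state)) with
  | none => 0
  | some (l, h, r, _) => l.sum + h + r.sum

-- ===== PRECONDITION & SPEC =====
-- Pre_ excludes exactly the inputs where A raises KeyError (an unknown start state with at
-- least one step to run); B raises KeyError there too.
def Pre_part1 (maxstep : Int) (state : String) : Prop :=
  maxstep ≤ 0 ∨ state = "A" ∨ state = "B" ∨ state = "C" ∨ state = "D" ∨ state = "E" ∨ state = "F"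
instance (maxstep : Int) (state : String) : Decidable (Pre_part1 maxstep state) := by
  unfold Pre_part1; infer_instance

def pvWitness_part1 : Int × String := (12, "A")

def Spec_part1 (maxstep : Int) (state : String) (out : Int) : Prop := out = part1_alt maxstep state
instance (maxstep : Int) (state : String) (out : Int) : Decidable (Spec_part1 maxstep state out) := by unfold Spec_part1; infer_instance

-- ===== CLAIM (what is proved, stated in full; the proofs are below) =====
def Claim_equal_part1 : Prop := ∀ (maxstep : Int) (state : String), Dom_part1 maxstep state → Pre_part1 maxstep state → Spec_part1 maxstep state (part1 maxstep state)

-- ===== LEMMAS AND PROOFS =====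

-- sum of the second components of a pair list after overwriting the (unique) entry with key k
theorem sum_snd_replace (l : List (Int × Int)) (k v w : Int)
    (hnd : (l.map Prod.fst).Nodup) (hm : (k, w) ∈ l) :
    ((l.map (fun p => if p.1 == k then (k, v) else p)).map Prod.snd).sum
      = (l.map Prod.snd).sum - w + v := by
  induction l with
  | nil => cases hm
  | cons a t ih =>
    simp only [List.map_cons, List.nodup_cons] at hnd
    by_cases hak : a.1 = k
    · have hkt : k ∉ t.map Prod.fst := hak ▸ hnd.1
      have hwa : a = (k, w) := by
        rcases List.mem_cons.mp hm with h | h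
        · exact h.symm
        · exact absurd (List.mem_map_of_mem (f := Prod.fst) h) hkt
      have ht : t.map (fun p => if p.1 == k then (k, v) else p) = t := by
        have hcg : ∀ p ∈ t, (fun p => if p.1 == k then (k, v) else p) p = id p := by
          intro p hp
          have hpk : p.1 ≠ k := fun hpk =>
            hkt (hpk ▸ List.mem_map_of_mem (f := Prod.fst) hp)
          simp [hpk]
        rw [List.map_congr_left hcg, List.map_id]
      have hb : a.2 = w := by rw [hwa]
      simp only [List.map_cons, ht, hak, beq_self_eq_true, if_true, List.sum_cons, hb]
      omega
    · have hm' : (k, w) ∈ t := by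
        rcases List.mem_cons.mp hm with h | h
        · exact absurd (congrArg Prod.fst h).symm hak
        · exact h
      have hrec := ih hnd.2 hm'
      have hne : (a.1 == k) = false := by simpa using hak
      simp only [List.map_cons, hne, Bool.false_eq_true, if_false, List.sum_cons]
      omega

-- sum of a dict's values after insert, when the keys are distinct
theorem sum_vals_insert (d : PySem.Dict Int Int) (k v : Int) (hnd : d.keys.Nodup) :
    ((d.insert k v).items.map Prod.snd).sum = (d.items.map Prod.snd).sum - d.getD k 0 + v := by
  rw [PySem.Dict.items_insert]
  by_cases hc : d.contains k = true
  · obtain ⟨w, hw⟩ : ∃ w, d.get? k = some w := by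
      have h := PySem.Dict.contains_eq_isSome_get? (d := d) (k := k)
      rw [hc] at h
      exact Option.isSome_iff_exists.mp h.symm
    have hmem : (k, w) ∈ d.items := PySem.Dict.mem_items_of_get?_eq_some d hw
    have hgd : d.getD k 0 = w := PySem.Dict.getD_of_get?_eq_some (d := d) 0 hw
    rw [if_pos hc, hgd]
    exact sum_snd_replace d.items k v w hnd hmem
  · rw [if_neg hc, PySem.Dict.getD_of_not_contains d 0 (by simpa using hc)]
    simp

-- popTop in terms of the reversed stack
theorem popTop_eq (xs : List Int) :
    popTop xs = (xs.reverse.headD 0, xs.reverse.tail.reverse) := by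
  induction xs using List.reverseRecOn with
  | nil => simp [popTop]
  | append_singleton ys a _ => simp [popTop]

theorem getD_tail (xs : List Int) (i : Nat) : xs.tail.getD i 0 = xs.getD (i + 1) 0 := by
  cases xs <;> simp [List.getD]

-- the loop invariant tying A's dict state to B's zipper state
def TMInv (a : PySem.Dict Int Int × Int × String) (b : List Int × Int × List Int × String) : Prop :=
  a.2.2 = b.2.2.2 ∧ b.2.1 = a.1.getD a.2.1 0 ∧ a.1.keys.Nodup ∧
  (∀ k : Int, a.1.getD k 0 = 0 ∨ a.1.getD k 0 = 1) ∧
  (∀ i : Nat, b.1.reverse.getD i 0 = a.1.getD (a.2.1 - 1 - i) 0) ∧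
  (∀ i : Nat, b.2.2.1.reverse.getD i 0 = a.1.getD (a.2.1 + 1 + i) 0) ∧
  (a.1.items.map Prod.snd).sum = b.1.sum + b.2.1 + b.2.2.1.sum

def TMOInv (a : Option (PySem.Dict Int Int × Int × String))
    (b : Option (List Int × Int × List Int × String)) : Prop :=
  match a, b with
  | none, none => True
  | some a, some b => TMInv a b
  | _, _ => False

-- A's lambda table and B's TABLE-row selection agree on bits 0 and 1
theorem ops_eq_table (st : String) (bit : Int) (hb : bit = 0 ∨ bit = 1) :
    opsA st bit = (tableB st).bind (fun t => pickB t bit) := by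
  by_cases hA : st = "A"
  · rcases hb with rfl | rfl <;> subst hA <;> simp [opsA, tableB, pickB]
  by_cases hB : st = "B"
  · rcases hb with rfl | rfl <;> subst hB <;> simp [opsA, tableB, pickB]
  by_cases hC : st = "C"
  · rcases hb with rfl | rfl <;> subst hC <;> simp [opsA, tableB, pickB]
  by_cases hD : st = "D"
  · rcases hb with rfl | rfl <;> subst hD <;> simp [opsA, tableB, pickB]
  by_cases hE : st = "E"
  · rcases hb with rfl | rfl <;> subst hE <;> simp [opsA, tableB, pickB]
  by_cases hF : st = "F"
  · rcases hb with rfl | rfl <;> subst hF <;> simp [opsA, tableB, pickB]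
  rcases hb with rfl | rfl <;>
    simp [opsA, tableB, pickB, hA, hB, hC, hD, hE, hF]

-- the write is always a bit and the move always ±1
theorem opsA_shape (st : String) (c wr mv : Int) (ns : String)
    (h : opsA st c = some (wr, mv, ns)) : (wr = 0 ∨ wr = 1) ∧ (mv = 1 ∨ mv = -1) := by
  unfold opsA at h
  split_ifs at h <;> simp_all <;> omega

theorem step_inv (a : Option (PySem.Dict Int Int × Int × String))
    (b : Option (List Int × Int × List Int × String)) (h : TMOInv a b) :
    TMOInv (stepA a) (stepB b) := by
  match a, b with
  | none, none => exact trivial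
  | some (tm, curr, st), some (left, head, right, st') =>
    obtain ⟨hs, hh, hndk, hbits, hl, hr, hsum⟩ := h
    simp only at hs hh hndk hbits hl hr hsum
    subst hs
    have hb01 : tm.getD curr 0 = 0 ∨ tm.getD curr 0 = 1 := hbits curr
    simp only [stepA, stepB, ← hh]
    rw [show opsA st head = _ from hh ▸ ops_eq_table st (tm.getD curr 0) hb01]
    cases ht : tableB st with
    | none => exact trivial
    | some t =>
      simp only [Option.bind_some]
      cases hp : pickB t head with
      | none => exact trivial
      | some res =>
        obtain ⟨wr, mv, ns⟩ := res
        have hops : opsA st (tm.getD curr 0) = some (wr, mv, ns) := by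
          rw [ops_eq_table st (tm.getD curr 0) hb01, ht, Option.bind_some, ← hh, hp]
        obtain ⟨hwr, hmv⟩ := opsA_shape st _ _ _ _ hops
        have hndk' := PySem.Dict.nodup_keys_insert tm curr wr hndk
        have hbits' : ∀ k : Int, (tm.insert curr wr).getD k 0 = 0 ∨ (tm.insert curr wr).getD k 0 = 1 := by
          intro k
          rw [PySem.Dict.getD_insert]
          by_cases hk : k = curr
          · simpa [hk] using hwr
          · simpa [hk] using hbits k
        have hsum' : ((tm.insert curr wr).items.map Prod.snd).sum
            = left.sum + tm.getD curr 0 + right.sum - tm.getD curr 0 + wr := by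
          rw [sum_vals_insert tm curr wr hndk, hsum, hh]
        rcases hmv with rfl | rfl
        · -- move right: push wr on left, pop the new head off right
          simp only [popTop_eq]
          refine ⟨rfl, ?_, hndk', hbits', ?_, ?_, ?_⟩
          · -- new head = cell at curr+1
            dsimp only
            have h0 := hr 0
            rw [PySem.Dict.getD_insert, if_neg (by omega : ¬ (curr + 1 = curr))]
            cases hc : right.reverse with
            | nil => simpa [hc] using h0
            | cons x xs => simpa [hc] using h0
          · -- left invariant
            intro i
            dsimp only
            rw [List.reverse_append, List.reverse_singleton, List.singleton_append,
              PySem.Dict.getD_insert]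
            cases i with
            | zero =>
              rw [if_pos (by push_cast; omega : curr + 1 - 1 - ((0:Nat):Int) = curr)]
              simp [List.getD]
            | succ j =>
              rw [if_neg (by push_cast; omega : ¬ (curr + 1 - 1 - (((j+1):Nat):Int) = curr)),
                show curr + 1 - 1 - (((j+1):Nat):Int) = curr - 1 - (j:Int) by push_cast; omega]
              simpa [List.getD] using hl j
          · -- right invariant
            intro i
            dsimp only
            rw [List.reverse_reverse, getD_tail, PySem.Dict.getD_insert,
              if_neg (by omega : ¬ (curr + 1 + 1 + (i:Int) = curr)),
              show curr + 1 + 1 + (i:Int) = curr + 1 + (((i+1):Nat):Int) by push_cast; omega]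
            exact hr (i + 1)
          · -- sum invariant
            dsimp only
            rw [hsum', List.sum_append, List.sum_singleton]
            cases hc : right.reverse with
            | nil =>
              have hre : right = [] := by simpa using congrArg List.reverse hc
              subst hre
              simp only [hc, List.headD_nil, List.tail_nil, List.sum_nil]
              ring
            | cons x xs =>
              have hrs : right.sum = x + xs.sum := by
                have hsr : right.reverse.sum = right.sum := List.sum_reverse right
                rw [hc] at hsr; simpa using hsr.symm
              simp only [List.headD_cons, List.tail_cons, List.sum_reverse, hrs]
              ring
        · -- move left: push wr on right, pop the new head off left
          simp only [if_neg (by omega : ¬ ((-1 : Int) = 1)), popTop_eq]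
          refine ⟨rfl, ?_, hndk', hbits', ?_, ?_, ?_⟩
          · -- new head = cell at curr-1
            dsimp only
            have h0 := hl 0
            rw [PySem.Dict.getD_insert, if_neg (by omega : ¬ (curr + -1 = curr))]
            rw [show curr + -1 = curr - 1 - ((0:Nat):Int) by push_cast; omega]
            cases hc : left.reverse with
            | nil => simpa [hc] using h0
            | cons x xs => simpa [hc] using h0
          · -- left invariant
            intro i
            dsimp only
            rw [List.reverse_reverse, getD_tail, PySem.Dict.getD_insert,
              if_neg (by omega : ¬ (curr + -1 - 1 - (i:Int) = curr)),
              show curr + -1 - 1 - (i:Int) = curr - 1 - (((i+1):Nat):Int) by push_cast; omega]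
            exact hl (i + 1)
          · -- right invariant
            intro i
            dsimp only
            rw [List.reverse_append, List.reverse_singleton, List.singleton_append,
              PySem.Dict.getD_insert]
            cases i with
            | zero =>
              rw [if_pos (by push_cast; omega : curr + -1 + 1 + ((0:Nat):Int) = curr)]
              simp [List.getD]
            | succ j =>
              rw [if_neg (by push_cast; omega : ¬ (curr + -1 + 1 + (((j+1):Nat):Int) = curr)),
                show curr + -1 + 1 + (((j+1):Nat):Int) = curr + 1 + (j:Int) by push_cast; omega]
              simpa [List.getD] using hr j
          · -- sum invariant
            dsimp only
            rw [hsum', List.sum_append, List.sum_singleton]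
            cases hc : left.reverse with
            | nil =>
              have hle : left = [] := by simpa using congrArg List.reverse hc
              subst hle
              simp only [hc, List.headD_nil, List.tail_nil, List.sum_nil]
              ring
            | cons x xs =>
              have hls : left.sum = x + xs.sum := by
                have hsl : left.reverse.sum = left.sum := List.sum_reverse left
                rw [hc] at hsl; simpa using hsl.symm
              simp only [List.headD_cons, List.tail_cons, List.sum_reverse, hls]
              ring

theorem fold_inv (l : List Int) (a : Option (PySem.Dict Int Int × Int × String))
    (b : Option (List Int × Int × List Int × String)) (h : TMOInv a b) :
    TMOInv (l.foldl (fun acc _ => stepA acc) a) (l.foldl (fun acc _ => stepB acc) b) := by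
  induction l generalizing a b with
  | nil => exact h
  | cons x t ih => exact ih _ _ (step_inv a b h)

-- ===== VERDICT (by name: the statement is the Claim_ definition above) =====
theorem part1_spec : Claim_equal_part1 := by
  intro maxstep state _ _
  unfold Spec_part1 part1 part1_alt
  have h0 : TMOInv (some ((PySem.Dict.empty : PySem.Dict Int Int), (0 : Int), state))
      (some (([] : List Int), (0 : Int), ([] : List Int), state)) :=
    ⟨rfl, rfl, List.nodup_nil, fun _ => Or.inl rfl, fun _ => rfl, fun _ => rfl, rfl⟩
  have h := fold_inv (PySem.List.pyRange 0 maxstep 1) _ _ h0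
  cases ha : (PySem.List.pyRange 0 maxstep 1).foldl (fun acc _ => stepA acc)
      (some ((PySem.Dict.empty : PySem.Dict Int Int), (0 : Int), state)) with
  | none =>
    cases hb : (PySem.List.pyRange 0 maxstep 1).foldl (fun acc _ => stepB acc)
        (some (([] : List Int), (0 : Int), ([] : List Int), state)) with
    | none => rfl
    | some b => rw [ha, hb] at h; exact absurd h (by simp [TMOInv])
  | some a =>
    cases hb : (PySem.List.pyRange 0 maxstep 1).foldl (fun acc _ => stepB acc)
        (some (([] : List Int), (0 : Int), ([] : List Int), state)) with
    | none => rw [ha, hb] at h; exact absurd h (by simp [TMOInv])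
    | some b =>
      rw [ha, hb] at h
      obtain ⟨tm, c, s⟩ := a
      obtain ⟨l, hd, r, s'⟩ := b
      obtain ⟨-, -, -, -, -, -, hsum⟩ := h
      show tm.items.foldl (fun s p => s + p.2) 0 = l.sum + hd + r.sum
      rw [PySem.List.foldl_add tm.items (fun p => p.2) 0]
      simpa using hsum
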